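-- pv_equiv track=rewrite | github.com/les-champs/cbb-ballots | userpoll.py | remove_week_block
-- ===== SOURCE A (Python) =====
-- def remove_week_block(data_html, week_id):
--     """Remove a week's data block from data_html by walking div depth."""
--     start_tag = f'<div id="{week_id}"'
--     start_idx = data_html.find(start_tag)
--     if start_idx == -1:
--         return data_html
--     depth, i = 0, start_idx
--     while i < len(data_html):
--         if data_html[i:i+4] == '<div':
--             depth += 1; i += 4
--         elif data_html[i:i+6] == '</div>':
--             depth -= 1
--             if depth == 0:
--                 return data_html[:start_idx] + data_html[i+6:]
--             i += 6
--         else: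
--             i += 1
--     return data_html
-- ===== SOURCE B (Python) =====
-- def remove_week_block(data_html, week_id):
--     """Remove a week's data block by jumping between '</div>' occurrences,
--     adjusting depth by the count of '<div' in each gap."""
--     start_idx = data_html.find(f'<div id="{week_id}"')
--     if start_idx == -1:
--         return data_html
--     depth, pos = 0, start_idx
--     while True:
--         close = data_html.find('</div>', pos)
--         if close == -1:
--             return data_html
--         depth += data_html[pos:close].count('<div') - 1
--         if depth == 0:
--             return data_html[:start_idx] + data_html[close + 6:]
--         pos = close + 6
-- ===== Notes on version B (the rewrite author's own statement) =====
-- stated objective: alternative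
-- what changed: A walks the string character by character from start_idx, testing for '<div'/'</div>' at every index; B instead jumps directly from one '</div>' occurrence to the next with str.find and adjusts the depth by the str.count of '<div' in each gap, falling through to the original string when no balanced close exists, exactly as A does.
import Mathlib
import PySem

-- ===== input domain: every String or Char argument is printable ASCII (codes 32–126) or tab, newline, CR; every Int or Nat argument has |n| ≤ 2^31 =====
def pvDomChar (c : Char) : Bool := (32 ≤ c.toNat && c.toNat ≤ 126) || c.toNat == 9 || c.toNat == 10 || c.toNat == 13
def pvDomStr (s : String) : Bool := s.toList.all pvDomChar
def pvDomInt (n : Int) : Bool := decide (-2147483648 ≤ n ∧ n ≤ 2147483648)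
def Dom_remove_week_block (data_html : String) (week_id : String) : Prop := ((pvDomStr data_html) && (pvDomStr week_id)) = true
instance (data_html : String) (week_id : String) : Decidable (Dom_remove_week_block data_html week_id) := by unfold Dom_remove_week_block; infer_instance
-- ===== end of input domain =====

-- B replaces A's character-by-character depth walk by jumping from one '</div>' occurrence to the
-- next with str.find and adjusting the depth by the count of '<div' in each gap (objective: alternative).

-- ===== PORT A =====
-- the while loop of A: index i walks one token (or one character) at a time
def pvLoopA (s : List Char) (start : Nat) (depth : Int) (i : Nat) : List Char :=
  if _h : i < s.length then
    if PySem.List.slice s (some (i : Int)) (some ((i + 4 : Nat) : Int)) = "<div".toList then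
      pvLoopA s start (depth + 1) (i + 4)
    else if PySem.List.slice s (some (i : Int)) (some ((i + 6 : Nat) : Int)) = "</div>".toList then
      if depth - 1 = 0 then
        PySem.List.slice s none (some (start : Int)) ++ PySem.List.slice s (some ((i + 6 : Nat) : Int)) none
      else pvLoopA s start (depth - 1) (i + 6)
    else pvLoopA s start depth (i + 1)
  else s
termination_by s.length - i
decreasing_by all_goals omega

def remove_week_block (data_html : String) (week_id : String) : String :=
  let start_tag : List Char := "<div id=\"".toList ++ week_id.toList ++ "\"".toList
  let s := data_html.toList
  let start_idx := PySem.Chars.find s start_tag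
  if start_idx = -1 then data_html
  else String.ofList (pvLoopA s start_idx.toNat 0 start_idx.toNat)

-- ===== PORT B =====
-- the while loop of B: jump to the next '</div>' (none left: fall through), add the
-- count of '<div' in the gap; the `hpos` argument is only the totality guard for the recursion
def pvLoopB (s : List Char) (start : Nat) (depth : Int) (pos : Nat) (hpos : pos ≤ s.length) : List Char :=
  let close := PySem.Chars.findFrom s "</div>".toList (pos : Int) none
  if hc : close = -1 then s
  else
    have spec := PySem.Chars.findFrom_natCast_spec s "</div>".toList pos hpos hc
    let depth' := depth + (PySem.Chars.count (PySem.List.slice s (some (pos : Int)) (some close)) "<div".toList : Int) - 1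
    if depth' = 0 then
      PySem.List.slice s none (some (start : Int)) ++ PySem.List.slice s (some ((close.toNat + 6 : Nat) : Int)) none
    else
      pvLoopB s start depth' (close.toNat + 6)
        (by
          have h6 := spec.2.1.length_le
          rw [List.length_drop] at h6
          have h7 : ("</div>".toList).length = 6 := by decide
          omega)
termination_by s.length - pos
decreasing_by
  have hge := spec.1
  have h6 := spec.2.1.length_le
  rw [List.length_drop] at h6
  have h7 : ("</div>".toList).length = 6 := by decide
  omega

def remove_week_block_alt (data_html : String) (week_id : String) : String :=
  let start_tag : List Char := "<div id=\"".toList ++ week_id.toList ++ "\"".toList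
  let s := data_html.toList
  let start_idx := PySem.Chars.find s start_tag
  if hs : start_idx = -1 then data_html
  else String.ofList (pvLoopB s start_idx.toNat 0 start_idx.toNat
    (by
      have h1 := PySem.Chars.find_le_length s start_tag
      have h2 := PySem.Chars.neg_one_le_find s start_tag
      omega))

-- ===== PRECONDITION & SPEC =====
def Spec_remove_week_block (data_html : String) (week_id : String) (out : String) : Prop := out = remove_week_block_alt data_html week_id
instance (data_html : String) (week_id : String) (out : String) : Decidable (Spec_remove_week_block data_html week_id out) := by unfold Spec_remove_week_block; infer_instance

-- ===== CLAIM (what is proved, stated in full; the proofs are below) =====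
def Claim_equal_remove_week_block : Prop := ∀ (data_html : String) (week_id : String), Dom_remove_week_block data_html week_id → Spec_remove_week_block data_html week_id (remove_week_block data_html week_id)

-- ===== LEMMAS AND PROOFS =====

-- a prefix of a drop pins down the characters of s
lemma pv_prefix_drop_getElem? {s p : List Char} {i k : Nat}
    (h : p <+: s.drop i) (hk : k < p.length) : s[i + k]? = some p[k] := by
  obtain ⟨r, hr⟩ := h
  rw [← List.getElem?_drop, ← hr, List.getElem?_append_left hk, List.getElem?_eq_getElem hk]

-- neither token can start where the character is not '<'
lemma pv_no_tag_at {s : List Char} {j : Nat} (h : s[j]? ≠ some '<') :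
    ¬ "<div".toList <+: s.drop j ∧ ¬ "</div>".toList <+: s.drop j := by
  constructor <;> intro hp <;>
    exact h (by simpa using pv_prefix_drop_getElem? (k := 0) hp (by decide))

-- a '</div>' start excludes a '<div' start at the same index
lemma pv_close_not_open {s : List Char} {j : Nat} (h : "</div>".toList <+: s.drop j) :
    ¬ "<div".toList <+: s.drop j := by
  intro hp
  have h1 := pv_prefix_drop_getElem? h (show 1 < ("</div>".toList).length by decide)
  have h2 := pv_prefix_drop_getElem? hp (show 1 < ("<div".toList).length by decide)
  rw [h1] at h2
  simp at h2

-- take n l = p (for p of length n) is exactly "p is a prefix of l"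
lemma pv_take_eq_iff {α : Type} {l p : List α} {n : Nat} (hp : p.length = n) :
    l.take n = p ↔ p <+: l := by
  constructor
  · intro h; exact h ▸ List.take_prefix n l
  · intro h; rw [List.prefix_iff_eq_take] at h; rw [hp] at h; exact h.symm

lemma pv_go_nil (sub : List Char) : ∀ f acc, PySem.Chars.count.go sub f [] acc = acc := by
  intro f acc; cases f <;> rw [PySem.Chars.count.go] <;> simp

lemma pv_go_cons (sub : List Char) (f : Nat) (x : Char) (l : List Char) (acc : Nat) :
    PySem.Chars.count.go sub (f+1) (x::l) acc =
      if sub.isPrefixOf (x::l) then PySem.Chars.count.go sub f ((x::l).drop sub.length) (acc+1)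
      else PySem.Chars.count.go sub f l acc := by
  rw [PySem.Chars.count.go]

lemma pv_count_go_fuel {sub : List Char} (hsub : sub ≠ []) :
    ∀ fuel fuel' (l : List Char) (acc : Nat), l.length ≤ fuel → l.length ≤ fuel' →
      PySem.Chars.count.go sub fuel l acc = PySem.Chars.count.go sub fuel' l acc := by
  intro fuel
  induction fuel with
  | zero =>
    intro fuel' l acc h1 _
    have : l = [] := by cases l <;> simp_all
    subst this; rw [pv_go_nil, pv_go_nil]
  | succ f ih =>
    intro fuel' l acc h1 h2
    cases l with
    | nil => rw [pv_go_nil, pv_go_nil]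
    | cons x t =>
      obtain ⟨f', rfl⟩ : ∃ f', fuel' = f' + 1 := ⟨fuel' - 1, by simp at h2; omega⟩
      rw [pv_go_cons, pv_go_cons]
      have hk : 1 ≤ sub.length := by cases sub <;> simp_all
      simp only [List.length_cons] at h1 h2
      split
      · exact ih f' _ _ (by simp; omega) (by simp; omega)
      · exact ih f' t acc (by omega) (by omega)

lemma pv_count_go_acc {sub : List Char} :
    ∀ fuel (l : List Char) (acc : Nat),
      PySem.Chars.count.go sub fuel l acc = acc + PySem.Chars.count.go sub fuel l 0 := by
  intro fuel
  induction fuel with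
  | zero => intro l acc; cases l <;> rw [PySem.Chars.count.go] <;> rw [PySem.Chars.count.go] <;> simp
  | succ f ih =>
    intro l acc
    cases l with
    | nil => rw [pv_go_nil, pv_go_nil]; omega
    | cons x t =>
      rw [pv_go_cons, pv_go_cons]
      split
      · rw [ih _ (acc+1), ih _ (0+1)]; omega
      · exact ih t acc

lemma pv_count_of_prefix {sub l : List Char} (hsub : sub ≠ []) (h : sub <+: l) :
    PySem.Chars.count l sub = PySem.Chars.count (l.drop sub.length) sub + 1 := by
  have hk : 1 ≤ sub.length := by cases sub <;> simp_all
  cases l with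
  | nil =>
    exfalso
    have := h.length_le; simp_all
  | cons x t =>
    rw [PySem.Chars.count, PySem.Chars.count]
    rw [if_neg (by simp [hsub]), if_neg (by simp [hsub])]
    rw [List.length_cons, pv_go_cons]
    rw [if_pos (List.isPrefixOf_iff_prefix.mpr h)]
    rw [pv_count_go_acc]
    rw [pv_count_go_fuel hsub t.length ((x::t).drop sub.length).length _ 0 (by simp; omega) le_rfl]
    omega

lemma pv_count_of_not_prefix {sub : List Char} {x : Char} {l : List Char} (hsub : sub ≠ [])
    (h : ¬ sub <+: (x :: l)) :
    PySem.Chars.count (x :: l) sub = PySem.Chars.count l sub := by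
  rw [PySem.Chars.count, PySem.Chars.count]
  rw [if_neg (by simp [hsub]), if_neg (by simp [hsub])]
  rw [List.length_cons, pv_go_cons]
  rw [if_neg (fun hp => h (List.isPrefixOf_iff_prefix.mp hp))]

-- the slice tests of A are prefix tests
lemma pv_slice4_iff (s : List Char) (i : Nat) :
    PySem.List.slice s (some (i : Int)) (some ((i + 4 : Nat) : Int)) = "<div".toList ↔
      "<div".toList <+: s.drop i := by
  rw [PySem.List.slice_natCast, show i + 4 - i = 4 from by omega]
  exact pv_take_eq_iff (by decide)

lemma pv_slice6_iff (s : List Char) (i : Nat) :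
    PySem.List.slice s (some (i : Int)) (some ((i + 6 : Nat) : Int)) = "</div>".toList ↔
      "</div>".toList <+: s.drop i := by
  rw [PySem.List.slice_natCast, show i + 6 - i = 6 from by omega]
  exact pv_take_eq_iff (by decide)

-- no '</div>' can start strictly inside a '<div' occurrence
lemma pv_open_mid {s : List Char} {i j : Nat} (h4 : "<div".toList <+: s.drop i)
    (h1 : i < j) (h2 : j < i + 4) : ¬ "</div>".toList <+: s.drop j := by
  have hk : j - i < ("<div".toList).length := by simp; omega
  have hc := pv_prefix_drop_getElem? (k := j - i) h4 hk
  rw [show i + (j - i) = j from by omega] at hc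
  refine (pv_no_tag_at ?_).2
  rw [hc]
  intro hEq
  injection hEq with hEq
  have key : ∀ m, (hm : m < ("<div".toList).length) → 1 ≤ m → ¬ ("<div".toList)[m] = '<' := by decide
  exact key (j - i) hk (by omega) hEq

-- A's walk never returns early when no '</div>' occurrence lies at or after i
lemma pv_loopA_no_close (s : List Char) (start : Nat) :
    ∀ n (depth : Int) (i : Nat), s.length - i ≤ n →
      (∀ j, i ≤ j → ¬ "</div>".toList <+: s.drop j) →
      pvLoopA s start depth i = s := by
  intro n
  induction n with
  | zero =>
    intro depth i h1 _
    rw [pvLoopA, dif_neg (by omega)]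
  | succ n ih =>
    intro depth i h1 h2
    by_cases hlen : i < s.length
    · rw [pvLoopA, dif_pos hlen]
      by_cases h4 : PySem.List.slice s (some (i : Int)) (some ((i + 4 : Nat) : Int)) = "<div".toList
      · rw [if_pos h4]
        exact ih _ _ (by omega) (fun j hj => h2 j (by omega))
      · rw [if_neg h4]
        rw [if_neg (fun hh => h2 i le_rfl ((pv_slice6_iff _ _).mp hh))]
        exact ih _ _ (by omega) (fun j hj => h2 j (by omega))
    · rw [pvLoopA, dif_neg hlen]

-- A's walk from pos up to the first '</div>' at c accumulates the '<div' count of the gap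
lemma pv_loopA_walk (s : List Char) (start : Nat) (c : Nat)
    (hc6 : c + 6 ≤ s.length) (hP6 : "</div>".toList <+: s.drop c) :
    ∀ n (pos : Nat) (depth : Int), pos ≤ c → c - pos ≤ n →
      (∀ j, pos ≤ j → j < c → ¬ "</div>".toList <+: s.drop j) →
      pvLoopA s start depth pos =
        pvLoopA s start (depth + (PySem.Chars.count ((s.drop pos).take (c - pos)) "<div".toList : Int)) c := by
  intro n
  induction n with
  | zero =>
    intro pos depth hpc hn _
    obtain rfl : pos = c := by omega
    simp
  | succ n ih =>
    intro pos depth hpc hn hmin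
    by_cases heq : pos = c
    · subst heq
      simp
    · have hlt : pos < c := by omega
      have hlen : pos < s.length := by omega
      rw [pvLoopA, dif_pos hlen]
      by_cases h4 : PySem.List.slice s (some (pos : Int)) (some ((pos + 4 : Nat) : Int)) = "<div".toList
      · rw [if_pos h4]
        have hp4 : "<div".toList <+: s.drop pos := (pv_slice4_iff _ _).mp h4
        have hc4 : pos + 4 ≤ c := by
          by_contra hcon
          exact pv_open_mid hp4 hlt (by omega) hP6
        rw [ih (pos + 4) (depth + 1) (by omega) (by omega) (fun j hj hj2 => hmin j (by omega) hj2)]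
        congr 1
        have hpref : "<div".toList <+: (s.drop pos).take (c - pos) :=
          List.prefix_take_iff.mpr ⟨hp4, by simp; omega⟩
        rw [pv_count_of_prefix (by decide) hpref]
        have hdt : ((s.drop pos).take (c - pos)).drop (("<div".toList).length) =
            (s.drop (pos + 4)).take (c - (pos + 4)) := by
          rw [show (("<div".toList)).length = 4 from by decide, List.drop_take, List.drop_drop,
            Nat.sub_sub]
        rw [hdt]
        push_cast
        ring
      · rw [if_neg h4]
        rw [if_neg (fun hh => hmin pos le_rfl hlt ((pv_slice6_iff _ _).mp hh))]
        rw [ih (pos + 1) depth (by omega) (by omega) (fun j hj hj2 => hmin j (by omega) hj2)]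
        congr 1
        have hcons : (s.drop pos).take (c - pos) =
            s[pos] :: (s.drop (pos + 1)).take (c - (pos + 1)) := by
          rw [List.drop_eq_getElem_cons hlen,
            show c - pos = (c - (pos + 1)) + 1 from by omega, List.take_succ_cons]
        rw [hcons, pv_count_of_not_prefix (by decide)
          (fun hp => h4 ((pv_slice4_iff _ _).mpr (List.prefix_take_iff.mp (hcons ▸ hp)).1))]

-- A's step at a '</div>' occurrence
lemma pv_loopA_close (s : List Char) (start : Nat) (c : Nat) (d : Int)
    (hc6 : c + 6 ≤ s.length) (hP6 : "</div>".toList <+: s.drop c) :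
    pvLoopA s start d c =
      if d - 1 = 0 then
        PySem.List.slice s none (some (start : Int)) ++ PySem.List.slice s (some ((c + 6 : Nat) : Int)) none
      else pvLoopA s start (d - 1) (c + 6) := by
  rw [pvLoopA, dif_pos (by omega)]
  rw [if_neg (fun hh => pv_close_not_open hP6 ((pv_slice4_iff _ _).mp hh))]
  rw [if_pos ((pv_slice6_iff _ _).mpr hP6)]

-- main loop equivalence
lemma pv_loop_eq (s : List Char) (start : Nat) :
    ∀ n (depth : Int) (pos : Nat) (hpos : pos ≤ s.length), s.length - pos ≤ n →
      pvLoopA s start depth pos = pvLoopB s start depth pos hpos := by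
  intro n
  induction n with
  | zero =>
    intro depth pos hpos hn
    by_cases hc : PySem.Chars.findFrom s "</div>".toList (pos : Int) none = -1
    · rw [pvLoopB]
      rw [dif_pos hc]
      have hno := (PySem.Chars.findFrom_natCast_eq_neg_one_iff s "</div>".toList pos hpos).mp hc
      refine pv_loopA_no_close s start s.length depth pos (by omega) ?_
      intro j hj hpre
      exact hno (List.infix_iff_prefix_suffix.mpr
        ⟨(s.drop pos).drop (j - pos), by rwa [List.drop_drop, show pos + (j - pos) = j from by omega],
          List.drop_suffix _ _⟩)
    · exfalso
      have spec := PySem.Chars.findFrom_natCast_spec s "</div>".toList pos hpos hc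
      have h6 := spec.2.1.length_le
      rw [List.length_drop] at h6
      have h7 : ("</div>".toList).length = 6 := by decide
      have h1 := spec.1
      omega
  | succ n ih =>
    intro depth pos hpos hn
    by_cases hc : PySem.Chars.findFrom s "</div>".toList (pos : Int) none = -1
    · rw [pvLoopB]
      rw [dif_pos hc]
      have hno := (PySem.Chars.findFrom_natCast_eq_neg_one_iff s "</div>".toList pos hpos).mp hc
      refine pv_loopA_no_close s start s.length depth pos (by omega) ?_
      intro j hj hpre
      exact hno (List.infix_iff_prefix_suffix.mpr
        ⟨(s.drop pos).drop (j - pos), by rwa [List.drop_drop, show pos + (j - pos) = j from by omega],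
          List.drop_suffix _ _⟩)
    · have spec := PySem.Chars.findFrom_natCast_spec s "</div>".toList pos hpos hc
      have h6 := spec.2.1.length_le
      rw [List.length_drop] at h6
      have h7 : ("</div>".toList).length = 6 := by decide
      have h1 := spec.1
      set C := PySem.Chars.findFrom s "</div>".toList (pos : Int) none with hC
      have hCnn : 0 ≤ C := le_trans (by omega) h1
      have hCc : C = ((C.toNat : Nat) : Int) := by omega
      have hc6 : C.toNat + 6 ≤ s.length := by omega
      have hpc : pos ≤ C.toNat := by omega
      rw [pv_loopA_walk s start C.toNat hc6 spec.2.1 (C.toNat - pos) pos depth hpc le_rfl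
        (fun j hj hj2 => spec.2.2 j hj hj2)]
      rw [pv_loopA_close s start C.toNat _ hc6 spec.2.1]
      rw [pvLoopB]
      rw [dif_neg hc]
      simp only
      have hslice : PySem.List.slice s (some (pos : Int)) (some C) =
          (s.drop pos).take (C.toNat - pos) := by
        conv_lhs => rw [hCc]
        rw [PySem.List.slice_natCast]
      rw [hslice]
      set cnt := (PySem.Chars.count ((s.drop pos).take (C.toNat - pos)) "<div".toList : Int)
      by_cases hz : depth + cnt - 1 = 0
      · rw [if_pos (by omega : depth + cnt - 1 = 0), if_pos hz]
      · rw [if_neg (by omega : ¬ depth + cnt - 1 = 0), if_neg hz]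
        exact ih (depth + cnt - 1) (C.toNat + 6) (by omega) (by omega)

-- ===== VERDICT (by name: the statement is the Claim_ definition above) =====
theorem remove_week_block_spec : Claim_equal_remove_week_block := by
  intro data_html week_id _hdom
  unfold Spec_remove_week_block remove_week_block remove_week_block_alt
  simp only
  split
  · rfl
  · congr 1
    exact pv_loop_eq _ _ _ _ _ _ le_rfl
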